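-- pv_equiv track=rewrite | github.com/abidkyo/i18n-puzzles | 2025/src/aoc.py | get_neighbour
-- ===== SOURCE A (Python) =====
-- from itertools import chain, islice, pairwise, product, repeat
--
-- def get_neighbour(x, y, direction=4):
--     assert direction in {3, 4, 8, 9}
--
--     for dx, dy in product([-1, 0, 1], repeat=2):
--         if (
--             (direction == 3 and abs(dx) == abs(dy) and not dx == dy == 0)  # diagonal
--             or (direction == 4 and abs(dx) != abs(dy))  # cardinal
--             or (direction == 8 and not dx == dy == 0)  # compass
--             or (direction == 9)
--         ):
--             yield (x + dx, y + dy)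
-- ===== SOURCE B (Python) =====
-- # Precomputed offset table per direction; same yield order as scanning product([-1,0,1],repeat=2).
-- _NEIGHBOUR_TABLE = {
--     3: [(-1, -1), (-1, 1), (1, -1), (1, 1)],
--     4: [(-1, 0), (0, -1), (0, 1), (1, 0)],
--     8: [(-1, -1), (-1, 0), (-1, 1), (0, -1), (0, 1), (1, -1), (1, 0), (1, 1)],
--     9: [(-1, -1), (-1, 0), (-1, 1), (0, -1), (0, 0), (0, 1), (1, -1), (1, 0), (1, 1)],
-- }
--
-- def get_neighbour(x, y, direction=4):
--     assert direction in {3, 4, 8, 9}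
--     for dx, dy in _NEIGHBOUR_TABLE[direction]:
--         yield (x + dx, y + dy)
-- ===== Notes on version B (the rewrite author's own statement) =====
-- stated objective: idiomatic
-- what changed: Replaces the nine-cell scan over product([-1,0,1],repeat=2) with per-cell branch conditions by a precomputed direction->offset-list table walked directly.
import Mathlib
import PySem

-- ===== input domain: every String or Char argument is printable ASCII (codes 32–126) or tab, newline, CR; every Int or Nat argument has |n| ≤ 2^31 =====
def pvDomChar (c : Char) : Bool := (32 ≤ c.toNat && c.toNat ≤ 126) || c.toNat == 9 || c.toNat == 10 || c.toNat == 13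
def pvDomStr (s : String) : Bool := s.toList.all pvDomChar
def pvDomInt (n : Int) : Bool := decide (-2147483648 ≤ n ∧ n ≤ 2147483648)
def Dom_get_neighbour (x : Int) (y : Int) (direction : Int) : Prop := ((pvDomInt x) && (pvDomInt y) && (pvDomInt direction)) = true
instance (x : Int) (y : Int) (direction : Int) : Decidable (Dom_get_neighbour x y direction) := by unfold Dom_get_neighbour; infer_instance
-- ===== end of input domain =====

-- B replaces the nine-cell filtered scan by a precomputed direction→offset-list table (idiomatic).

-- ===== PORT A =====
-- product([-1,0,1], repeat=2) in itertools order
def pvProduct2 : List (Int × Int) :=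
  [(-1,-1),(-1,0),(-1,1),(0,-1),(0,0),(0,1),(1,-1),(1,0),(1,1)]

def get_neighbour (x : Int) (y : Int) (direction : Int) : List (Int × Int) :=
  pvProduct2.foldl (fun acc p =>
    let dx := p.1; let dy := p.2
    if (direction = 3 ∧ |dx| = |dy| ∧ ¬(dx = 0 ∧ dy = 0))
       ∨ (direction = 4 ∧ |dx| ≠ |dy|)
       ∨ (direction = 8 ∧ ¬(dx = 0 ∧ dy = 0))
       ∨ (direction = 9)
    then acc ++ [(x + dx, y + dy)] else acc) []

-- ===== PORT B =====
-- the dict _NEIGHBOUR_TABLE, as an association list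
def pvNeighbourTable : PySem.Dict Int (List (Int × Int)) :=
  PySem.Dict.ofList [(3, [(-1,-1),(-1,1),(1,-1),(1,1)]),
   (4, [(-1,0),(0,-1),(0,1),(1,0)]),
   (8, [(-1,-1),(-1,0),(-1,1),(0,-1),(0,1),(1,-1),(1,0),(1,1)]),
   (9, [(-1,-1),(-1,0),(-1,1),(0,-1),(0,0),(0,1),(1,-1),(1,0),(1,1)])]

def get_neighbour_alt (x : Int) (y : Int) (direction : Int) : List (Int × Int) :=
  ((PySem.Dict.get? pvNeighbourTable direction).getD []).map (fun p => (x + p.1, y + p.2))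

-- ===== PRECONDITION & SPEC =====
-- A's assert: direction must be one of 3, 4, 8, 9, otherwise AssertionError.
def Pre_get_neighbour (x : Int) (y : Int) (direction : Int) : Prop :=
  direction = 3 ∨ direction = 4 ∨ direction = 8 ∨ direction = 9
instance (x : Int) (y : Int) (direction : Int) : Decidable (Pre_get_neighbour x y direction) := by unfold Pre_get_neighbour; infer_instance
def pvWitness_get_neighbour : Int × Int × Int := (0, 0, 4)

def Spec_get_neighbour (x : Int) (y : Int) (direction : Int) (out : List (Int × Int)) : Prop := out = get_neighbour_alt x y direction
instance (x : Int) (y : Int) (direction : Int) (out : List (Int × Int)) : Decidable (Spec_get_neighbour x y direction out) := by unfold Spec_get_neighbour; infer_instance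

-- ===== CLAIM (what is proved, stated in full; the proofs are below) =====
def Claim_equal_get_neighbour : Prop := ∀ (x : Int) (y : Int) (direction : Int), Dom_get_neighbour x y direction → Pre_get_neighbour x y direction → Spec_get_neighbour x y direction (get_neighbour x y direction)

-- ===== LEMMAS AND PROOFS =====

-- ===== VERDICT (by name: the statement is the Claim_ definition above) =====
theorem get_neighbour_spec : Claim_equal_get_neighbour := by
  intro x y direction _ hpre
  unfold Spec_get_neighbour
  have t3 : PySem.Dict.get? pvNeighbourTable 3
      = some [(-1,-1),(-1,1),(1,-1),(1,1)] := by decide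
  have t4 : PySem.Dict.get? pvNeighbourTable 4
      = some [(-1,0),(0,-1),(0,1),(1,0)] := by decide
  have t8 : PySem.Dict.get? pvNeighbourTable 8
      = some [(-1,-1),(-1,0),(-1,1),(0,-1),(0,1),(1,-1),(1,0),(1,1)] := by decide
  have t9 : PySem.Dict.get? pvNeighbourTable 9
      = some [(-1,-1),(-1,0),(-1,1),(0,-1),(0,0),(0,1),(1,-1),(1,0),(1,1)] := by decide
  rcases hpre with h | h | h | h <;> subst h <;>
    simp [get_neighbour, get_neighbour_alt, pvProduct2, t3, t4, t8, t9, List.foldl]
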